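-- pv_equiv track=rewrite | github.com/ali-m-dinani/reaxkit | src/reaxkit/utils/alias_utils.py | normalize_choice
-- ===== SOURCE A (Python) =====
-- from typing import Dict, List, Iterable, Optional
--
-- _DEFAULT_ALIAS_MAP: Dict[str, List[str]] = {
--     # Common summary aliases
--     "iter": ["iteration", "Iter", "Iter.", "Iteration", "#start", "start"],
--     "E_pot": ["Epot(kcal)", "Epot(kcal/mol)", "E_potential"], #used in xmolout and summary.txt
--     "frame": ['frm'],
--     "time": ["Time(fs)", "Time"], #also in summary.txt
--     "num_of_atoms": ['num_atoms','number_of_atoms','count_of_atoms'], #used in xmolout and fort.7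
--     "V": ["Vol(A^3)", "Volume", "volume"], #summary.txt and fort.74
--     "D": ["Dens(kg/dm3)", "Density", "density"], #summary.txt and fort.74
--
--     # molfra.out alias
--     "freq": ["frequency", "count"],
--     "molecular_formula": ["mol_formula", "molecule_formula", "molecule"],
--     "molecular_mass": ["mol_mass", "mass"],
--     "total_molecules": ["tot_mol"],
--     "total_atoms": ["tot_atom"],
--     "total_molecular_mass": ["tot_mol_mass"],
--
--     # fort.78 alias
--     "field_x":   ["Ex", "Efield_x", "Field_x", "fieldX"],
--     "field_y":   ["Ey", "Efield_y", "Field_y", "fieldY"],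
--     "field_z":   ["Ez", "Efield_z", "Field_z", "fieldZ"],
--     "E_field_x": ["Efx"],
--     "E_field_y": ["Efy"],
--     "E_field_z": ["Efz"],
--     "E_field":   ["Ef"],
--
--     # summary.txt alias
--     "nmol": ["Nmol"],
--     "T": ["T(K)", "Temp", "temp"],
--     "P": ["Pres(MPa)", "Pressure", "pressure"],
--     "elap_time": ["Elap", "time_elapsed", "elapsed_time"],
--
--     # fort.13 alias
--     "total_ff_error": ["tot_err", "err_tot"],
--
--     # eregime.in (generic + enumerated)
--     "field_zones": ["#V", "V"],
--     "field_dir": ["direction", "dir", "direction1"],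
--     "field": ["E", "Magnitude(V/A)", "Magnitude1(V/A)", "E1"],
--     "field_dir1": ["direction1"],
--     "field1": ["Magnitude1(V/A)", "E1"],
--     "field_dir2": ["direction2"],
--     "field2": ["Magnitude2(V/A)", "E2"],
--     "field_dir3": ["direction3"],
--     "field3": ["Magnitude3(V/A)", "E3"],
--
--     # xmolout alias
--     "atom_type": ['type_of_atom', 'atm_type'],
--     'x': ['x_coordinate', 'x_coord', 'coord_x', 'coordinate_x'],
--     'y': ['y_coordinate', 'y_coord', 'coord_y', 'coordinate_y'],
--     'z': ['z_coordinate', 'z_coord', 'coord_z', 'coordinate_z'],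
--
--     # fort.7 alias
--     "molecule_num": ['molecular_number', 'molecular_num'],
--     "partial_charge": ['charge', 'q'],
--
--     #fort.99 alias
--     "error": ["Err", "Error"],
--
--     #electrostatics
--     "mu_x (debye)": ["mu_x", "dipole_x", "dipole_moment_x"],
--     "mu_y (debye)": ["mu_y", "dipole_y", "dipole_moment_y"],
--     "mu_z (debye)": ["mu_z", "dipole_z", "dipole_moment_z"],
--     "P_x (uC/cm^2)": ["pol_x", "polarization_x"],
--     "P_y (uC/cm^2)": ["pol_y", "polarization_y"],
--     "P_z (uC/cm^2)": ["pol_z", "polarization_z"],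
-- }
--
-- def normalize_choice(value: str, domain: str = "xaxis") -> str:
--     """
--     Normalize user-provided keywords (e.g., CLI flags like --xaxis iter)
--     using the _DEFAULT_ALIAS_MAP definitions.
--
--     Example:
--         normalize_choice("iter") -> "iter"
--         normalize_choice("frm")  -> "frame"
--         normalize_choice("Time")    -> "time"
--     """
--     v = (value or "").strip().lower()
--     if not v:
--         return v
--
--     for canonical, aliases in _DEFAULT_ALIAS_MAP.items():
--         all_names = [canonical.lower()] + [a.lower() for a in aliases]
--         if v in all_names:
--             return canonical
--
--     return v
-- ===== SOURCE B (Python) =====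
-- from typing import Dict
--
-- # Precomputed reverse lookup table: lowercased name -> canonical keyword.
-- # Written out as a literal (first-listed canonical wins on colliding names
-- # such as 'v', 'e1', 'direction1'), so each call is a single dict lookup.
-- _REVERSE: Dict[str, str] = {
--     'iter': 'iter',
--     'iteration': 'iter',
--     'iter.': 'iter',
--     '#start': 'iter',
--     'start': 'iter',
--     'e_pot': 'E_pot',
--     'epot(kcal)': 'E_pot',
--     'epot(kcal/mol)': 'E_pot',
--     'e_potential': 'E_pot',
--     'frame': 'frame',
--     'frm': 'frame',
--     'time': 'time',
--     'time(fs)': 'time',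
--     'num_of_atoms': 'num_of_atoms',
--     'num_atoms': 'num_of_atoms',
--     'number_of_atoms': 'num_of_atoms',
--     'count_of_atoms': 'num_of_atoms',
--     'v': 'V',
--     'vol(a^3)': 'V',
--     'volume': 'V',
--     'd': 'D',
--     'dens(kg/dm3)': 'D',
--     'density': 'D',
--     'freq': 'freq',
--     'frequency': 'freq',
--     'count': 'freq',
--     'molecular_formula': 'molecular_formula',
--     'mol_formula': 'molecular_formula',
--     'molecule_formula': 'molecular_formula',
--     'molecule': 'molecular_formula',
--     'molecular_mass': 'molecular_mass',
--     'mol_mass': 'molecular_mass',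
--     'mass': 'molecular_mass',
--     'total_molecules': 'total_molecules',
--     'tot_mol': 'total_molecules',
--     'total_atoms': 'total_atoms',
--     'tot_atom': 'total_atoms',
--     'total_molecular_mass': 'total_molecular_mass',
--     'tot_mol_mass': 'total_molecular_mass',
--     'field_x': 'field_x',
--     'ex': 'field_x',
--     'efield_x': 'field_x',
--     'fieldx': 'field_x',
--     'field_y': 'field_y',
--     'ey': 'field_y',
--     'efield_y': 'field_y',
--     'fieldy': 'field_y',
--     'field_z': 'field_z',
--     'ez': 'field_z',
--     'efield_z': 'field_z',
--     'fieldz': 'field_z',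
--     'e_field_x': 'E_field_x',
--     'efx': 'E_field_x',
--     'e_field_y': 'E_field_y',
--     'efy': 'E_field_y',
--     'e_field_z': 'E_field_z',
--     'efz': 'E_field_z',
--     'e_field': 'E_field',
--     'ef': 'E_field',
--     'nmol': 'nmol',
--     't': 'T',
--     't(k)': 'T',
--     'temp': 'T',
--     'p': 'P',
--     'pres(mpa)': 'P',
--     'pressure': 'P',
--     'elap_time': 'elap_time',
--     'elap': 'elap_time',
--     'time_elapsed': 'elap_time',
--     'elapsed_time': 'elap_time',
--     'total_ff_error': 'total_ff_error',
--     'tot_err': 'total_ff_error',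
--     'err_tot': 'total_ff_error',
--     'field_zones': 'field_zones',
--     '#v': 'field_zones',
--     'field_dir': 'field_dir',
--     'direction': 'field_dir',
--     'dir': 'field_dir',
--     'direction1': 'field_dir',
--     'field': 'field',
--     'e': 'field',
--     'magnitude(v/a)': 'field',
--     'magnitude1(v/a)': 'field',
--     'e1': 'field',
--     'field_dir1': 'field_dir1',
--     'field1': 'field1',
--     'field_dir2': 'field_dir2',
--     'direction2': 'field_dir2',
--     'field2': 'field2',
--     'magnitude2(v/a)': 'field2',
--     'e2': 'field2',
--     'field_dir3': 'field_dir3',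
--     'direction3': 'field_dir3',
--     'field3': 'field3',
--     'magnitude3(v/a)': 'field3',
--     'e3': 'field3',
--     'atom_type': 'atom_type',
--     'type_of_atom': 'atom_type',
--     'atm_type': 'atom_type',
--     'x': 'x',
--     'x_coordinate': 'x',
--     'x_coord': 'x',
--     'coord_x': 'x',
--     'coordinate_x': 'x',
--     'y': 'y',
--     'y_coordinate': 'y',
--     'y_coord': 'y',
--     'coord_y': 'y',
--     'coordinate_y': 'y',
--     'z': 'z',
--     'z_coordinate': 'z',
--     'z_coord': 'z',
--     'coord_z': 'z',
--     'coordinate_z': 'z',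
--     'molecule_num': 'molecule_num',
--     'molecular_number': 'molecule_num',
--     'molecular_num': 'molecule_num',
--     'partial_charge': 'partial_charge',
--     'charge': 'partial_charge',
--     'q': 'partial_charge',
--     'error': 'error',
--     'err': 'error',
--     'mu_x (debye)': 'mu_x (debye)',
--     'mu_x': 'mu_x (debye)',
--     'dipole_x': 'mu_x (debye)',
--     'dipole_moment_x': 'mu_x (debye)',
--     'mu_y (debye)': 'mu_y (debye)',
--     'mu_y': 'mu_y (debye)',
--     'dipole_y': 'mu_y (debye)',
--     'dipole_moment_y': 'mu_y (debye)',
--     'mu_z (debye)': 'mu_z (debye)',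
--     'mu_z': 'mu_z (debye)',
--     'dipole_z': 'mu_z (debye)',
--     'dipole_moment_z': 'mu_z (debye)',
--     'p_x (uc/cm^2)': 'P_x (uC/cm^2)',
--     'pol_x': 'P_x (uC/cm^2)',
--     'polarization_x': 'P_x (uC/cm^2)',
--     'p_y (uc/cm^2)': 'P_y (uC/cm^2)',
--     'pol_y': 'P_y (uC/cm^2)',
--     'polarization_y': 'P_y (uC/cm^2)',
--     'p_z (uc/cm^2)': 'P_z (uC/cm^2)',
--     'pol_z': 'P_z (uC/cm^2)',
--     'polarization_z': 'P_z (uC/cm^2)',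
-- }
--
-- def normalize_choice(value: str, domain: str = "xaxis") -> str:
--     v = (value or "").strip().lower()
--     if not v:
--         return v
--     return _REVERSE.get(v, v)
-- ===== Notes on version B (the rewrite author's own statement) =====
-- stated objective: idiomatic
-- what changed: Replaces the per-call scan over the whole alias map (which rebuilds a lowered name list for every entry) with a precomputed literal reverse table lowered-name -> canonical (first-listed canonical kept on colliding names), so each call is a single dict lookup.
import Mathlib
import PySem

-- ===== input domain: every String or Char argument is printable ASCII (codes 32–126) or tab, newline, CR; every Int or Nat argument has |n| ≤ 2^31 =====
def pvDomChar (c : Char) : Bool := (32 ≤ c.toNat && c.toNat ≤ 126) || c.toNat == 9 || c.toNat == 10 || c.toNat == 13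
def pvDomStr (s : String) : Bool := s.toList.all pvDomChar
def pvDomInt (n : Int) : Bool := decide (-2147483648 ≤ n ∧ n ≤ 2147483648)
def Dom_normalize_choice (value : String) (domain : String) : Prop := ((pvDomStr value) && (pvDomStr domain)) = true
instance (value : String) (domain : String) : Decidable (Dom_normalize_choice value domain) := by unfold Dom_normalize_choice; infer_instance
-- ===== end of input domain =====

-- B replaces A's per-call scan of the alias map with a precomputed literal
-- reverse table (lowered name -> canonical, first-listed canonical kept on
-- colliding names), so each call is one lookup; the 'domain' parameter is
-- unused by both, as in the Python.

-- ===== PORT A =====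
def aliasMap : List (String × List String) := [
  ("iter", ["iteration", "Iter", "Iter.", "Iteration", "#start", "start"]),
  ("E_pot", ["Epot(kcal)", "Epot(kcal/mol)", "E_potential"]),
  ("frame", ["frm"]),
  ("time", ["Time(fs)", "Time"]),
  ("num_of_atoms", ["num_atoms", "number_of_atoms", "count_of_atoms"]),
  ("V", ["Vol(A^3)", "Volume", "volume"]),
  ("D", ["Dens(kg/dm3)", "Density", "density"]),
  ("freq", ["frequency", "count"]),
  ("molecular_formula", ["mol_formula", "molecule_formula", "molecule"]),
  ("molecular_mass", ["mol_mass", "mass"]),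
  ("total_molecules", ["tot_mol"]),
  ("total_atoms", ["tot_atom"]),
  ("total_molecular_mass", ["tot_mol_mass"]),
  ("field_x", ["Ex", "Efield_x", "Field_x", "fieldX"]),
  ("field_y", ["Ey", "Efield_y", "Field_y", "fieldY"]),
  ("field_z", ["Ez", "Efield_z", "Field_z", "fieldZ"]),
  ("E_field_x", ["Efx"]),
  ("E_field_y", ["Efy"]),
  ("E_field_z", ["Efz"]),
  ("E_field", ["Ef"]),
  ("nmol", ["Nmol"]),
  ("T", ["T(K)", "Temp", "temp"]),
  ("P", ["Pres(MPa)", "Pressure", "pressure"]),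
  ("elap_time", ["Elap", "time_elapsed", "elapsed_time"]),
  ("total_ff_error", ["tot_err", "err_tot"]),
  ("field_zones", ["#V", "V"]),
  ("field_dir", ["direction", "dir", "direction1"]),
  ("field", ["E", "Magnitude(V/A)", "Magnitude1(V/A)", "E1"]),
  ("field_dir1", ["direction1"]),
  ("field1", ["Magnitude1(V/A)", "E1"]),
  ("field_dir2", ["direction2"]),
  ("field2", ["Magnitude2(V/A)", "E2"]),
  ("field_dir3", ["direction3"]),
  ("field3", ["Magnitude3(V/A)", "E3"]),
  ("atom_type", ["type_of_atom", "atm_type"]),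
  ("x", ["x_coordinate", "x_coord", "coord_x", "coordinate_x"]),
  ("y", ["y_coordinate", "y_coord", "coord_y", "coordinate_y"]),
  ("z", ["z_coordinate", "z_coord", "coord_z", "coordinate_z"]),
  ("molecule_num", ["molecular_number", "molecular_num"]),
  ("partial_charge", ["charge", "q"]),
  ("error", ["Err", "Error"]),
  ("mu_x (debye)", ["mu_x", "dipole_x", "dipole_moment_x"]),
  ("mu_y (debye)", ["mu_y", "dipole_y", "dipole_moment_y"]),
  ("mu_z (debye)", ["mu_z", "dipole_z", "dipole_moment_z"]),
  ("P_x (uC/cm^2)", ["pol_x", "polarization_x"]),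
  ("P_y (uC/cm^2)", ["pol_y", "polarization_y"]),
  ("P_z (uC/cm^2)", ["pol_z", "polarization_z"])
]

-- the for-loop over _DEFAULT_ALIAS_MAP.items(): first entry whose lowered
-- names contain v wins; falls through to v.
def normalize_choice_scan (v : String) : List (String × List String) → String
  | [] => v
  | (canonical, aliases) :: rest =>
    let allNames := PySem.Str.lower canonical :: aliases.map PySem.Str.lower
    if v ∈ allNames then canonical else normalize_choice_scan v rest

def normalize_choice (value : String) (domain : String) : String :=
  -- v = (value or "").strip().lower(); for a str, (value or "") = value
  let v := PySem.Str.lower (PySem.Str.strip value)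
  if v = "" then v else normalize_choice_scan v aliasMap

-- ===== PORT B =====
-- Source B's module-level _REVERSE dict literal (keys distinct, insertion order)
def revTable : List (String × String) := [
  ("iter", "iter"),
  ("iteration", "iter"),
  ("iter.", "iter"),
  ("#start", "iter"),
  ("start", "iter"),
  ("e_pot", "E_pot"),
  ("epot(kcal)", "E_pot"),
  ("epot(kcal/mol)", "E_pot"),
  ("e_potential", "E_pot"),
  ("frame", "frame"),
  ("frm", "frame"),
  ("time", "time"),
  ("time(fs)", "time"),
  ("num_of_atoms", "num_of_atoms"),
  ("num_atoms", "num_of_atoms"),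
  ("number_of_atoms", "num_of_atoms"),
  ("count_of_atoms", "num_of_atoms"),
  ("v", "V"),
  ("vol(a^3)", "V"),
  ("volume", "V"),
  ("d", "D"),
  ("dens(kg/dm3)", "D"),
  ("density", "D"),
  ("freq", "freq"),
  ("frequency", "freq"),
  ("count", "freq"),
  ("molecular_formula", "molecular_formula"),
  ("mol_formula", "molecular_formula"),
  ("molecule_formula", "molecular_formula"),
  ("molecule", "molecular_formula"),
  ("molecular_mass", "molecular_mass"),
  ("mol_mass", "molecular_mass"),
  ("mass", "molecular_mass"),
  ("total_molecules", "total_molecules"),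
  ("tot_mol", "total_molecules"),
  ("total_atoms", "total_atoms"),
  ("tot_atom", "total_atoms"),
  ("total_molecular_mass", "total_molecular_mass"),
  ("tot_mol_mass", "total_molecular_mass"),
  ("field_x", "field_x"),
  ("ex", "field_x"),
  ("efield_x", "field_x"),
  ("fieldx", "field_x"),
  ("field_y", "field_y"),
  ("ey", "field_y"),
  ("efield_y", "field_y"),
  ("fieldy", "field_y"),
  ("field_z", "field_z"),
  ("ez", "field_z"),
  ("efield_z", "field_z"),
  ("fieldz", "field_z"),
  ("e_field_x", "E_field_x"),
  ("efx", "E_field_x"),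
  ("e_field_y", "E_field_y"),
  ("efy", "E_field_y"),
  ("e_field_z", "E_field_z"),
  ("efz", "E_field_z"),
  ("e_field", "E_field"),
  ("ef", "E_field"),
  ("nmol", "nmol"),
  ("t", "T"),
  ("t(k)", "T"),
  ("temp", "T"),
  ("p", "P"),
  ("pres(mpa)", "P"),
  ("pressure", "P"),
  ("elap_time", "elap_time"),
  ("elap", "elap_time"),
  ("time_elapsed", "elap_time"),
  ("elapsed_time", "elap_time"),
  ("total_ff_error", "total_ff_error"),
  ("tot_err", "total_ff_error"),
  ("err_tot", "total_ff_error"),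
  ("field_zones", "field_zones"),
  ("#v", "field_zones"),
  ("field_dir", "field_dir"),
  ("direction", "field_dir"),
  ("dir", "field_dir"),
  ("direction1", "field_dir"),
  ("field", "field"),
  ("e", "field"),
  ("magnitude(v/a)", "field"),
  ("magnitude1(v/a)", "field"),
  ("e1", "field"),
  ("field_dir1", "field_dir1"),
  ("field1", "field1"),
  ("field_dir2", "field_dir2"),
  ("direction2", "field_dir2"),
  ("field2", "field2"),
  ("magnitude2(v/a)", "field2"),
  ("e2", "field2"),
  ("field_dir3", "field_dir3"),
  ("direction3", "field_dir3"),
  ("field3", "field3"),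
  ("magnitude3(v/a)", "field3"),
  ("e3", "field3"),
  ("atom_type", "atom_type"),
  ("type_of_atom", "atom_type"),
  ("atm_type", "atom_type"),
  ("x", "x"),
  ("x_coordinate", "x"),
  ("x_coord", "x"),
  ("coord_x", "x"),
  ("coordinate_x", "x"),
  ("y", "y"),
  ("y_coordinate", "y"),
  ("y_coord", "y"),
  ("coord_y", "y"),
  ("coordinate_y", "y"),
  ("z", "z"),
  ("z_coordinate", "z"),
  ("z_coord", "z"),
  ("coord_z", "z"),
  ("coordinate_z", "z"),
  ("molecule_num", "molecule_num"),
  ("molecular_number", "molecule_num"),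
  ("molecular_num", "molecule_num"),
  ("partial_charge", "partial_charge"),
  ("charge", "partial_charge"),
  ("q", "partial_charge"),
  ("error", "error"),
  ("err", "error"),
  ("mu_x (debye)", "mu_x (debye)"),
  ("mu_x", "mu_x (debye)"),
  ("dipole_x", "mu_x (debye)"),
  ("dipole_moment_x", "mu_x (debye)"),
  ("mu_y (debye)", "mu_y (debye)"),
  ("mu_y", "mu_y (debye)"),
  ("dipole_y", "mu_y (debye)"),
  ("dipole_moment_y", "mu_y (debye)"),
  ("mu_z (debye)", "mu_z (debye)"),
  ("mu_z", "mu_z (debye)"),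
  ("dipole_z", "mu_z (debye)"),
  ("dipole_moment_z", "mu_z (debye)"),
  ("p_x (uc/cm^2)", "P_x (uC/cm^2)"),
  ("pol_x", "P_x (uC/cm^2)"),
  ("polarization_x", "P_x (uC/cm^2)"),
  ("p_y (uc/cm^2)", "P_y (uC/cm^2)"),
  ("pol_y", "P_y (uC/cm^2)"),
  ("polarization_y", "P_y (uC/cm^2)"),
  ("p_z (uc/cm^2)", "P_z (uC/cm^2)"),
  ("pol_z", "P_z (uC/cm^2)"),
  ("polarization_z", "P_z (uC/cm^2)")
]

-- _REVERSE.get(v, default): first (and only) matching key in the table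
def revGet (v : String) : List (String × String) → Option String
  | [] => none
  | (k, c) :: rest => if v = k then some c else revGet v rest

def normalize_choice_alt (value : String) (domain : String) : String :=
  let v := PySem.Str.lower (PySem.Str.strip value)
  if v = "" then v else (revGet v revTable).getD v

-- ===== PRECONDITION & SPEC =====
def Spec_normalize_choice (value : String) (domain : String) (out : String) : Prop := out = normalize_choice_alt value domain
instance (value : String) (domain : String) (out : String) : Decidable (Spec_normalize_choice value domain out) := by unfold Spec_normalize_choice; infer_instance

-- ===== CLAIM (what is proved, stated in full; the proofs are below) =====
def Claim_equal_normalize_choice : Prop := ∀ (value : String) (domain : String), Dom_normalize_choice value domain → Spec_normalize_choice value domain (normalize_choice value domain)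

-- ===== LEMMAS AND PROOFS =====

-- first match in A's scan, as an Option
def scanOpt (v : String) : List (String × List String) → Option String
  | [] => none
  | (canonical, aliases) :: rest =>
    if v ∈ PySem.Str.lower canonical :: aliases.map PySem.Str.lower
    then some canonical else scanOpt v rest

theorem scan_eq_scanOpt (v : String) (m : List (String × List String)) :
    normalize_choice_scan v m = (scanOpt v m).getD v := by
  induction m with
  | nil => rfl
  | cons p rest ih =>
    obtain ⟨c, as⟩ := p
    simp only [normalize_choice_scan, scanOpt]
    split_ifs with h <;> simp [ih]

-- flatten the alias map into (lowered name, canonical) pairs, duplicates kept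
def flattenMap (m : List (String × List String)) : List (String × String) :=
  m.flatMap fun p =>
    (PySem.Str.lower p.1, p.1) :: p.2.map (fun a => (PySem.Str.lower a, p.1))

theorem flattenMap_cons (p : String × List String) (rest : List (String × List String)) :
    flattenMap (p :: rest) =
      ((PySem.Str.lower p.1, p.1) :: p.2.map (fun a => (PySem.Str.lower a, p.1)))
        ++ flattenMap rest := by
  simp [flattenMap]

theorem revGet_append (v : String) (xs ys : List (String × String)) :
    revGet v (xs ++ ys) = ((revGet v xs).orElse (fun _ => revGet v ys)) := by
  induction xs with
  | nil => simp [revGet]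
  | cons p xs ih =>
    obtain ⟨k, c⟩ := p
    simp only [List.cons_append, revGet]
    split_ifs with h <;> simp [ih]

theorem revGet_entry_tail (v c : String) (as : List String) :
    revGet v (as.map (fun a => (PySem.Str.lower a, c))) =
      if v ∈ as.map PySem.Str.lower then some c else none := by
  induction as with
  | nil => simp [revGet]
  | cons b bs ih =>
    simp only [List.map_cons, revGet, ih]
    by_cases hb : v = PySem.Str.lower b <;> simp [hb]

theorem revGet_entry (v c : String) (as : List String) :
    revGet v ((PySem.Str.lower c, c) :: as.map (fun a => (PySem.Str.lower a, c))) =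
      if v ∈ PySem.Str.lower c :: as.map PySem.Str.lower then some c else none := by
  simp only [revGet, revGet_entry_tail]
  by_cases hc : v = PySem.Str.lower c <;> simp [hc]

theorem revGet_flatten (v : String) (m : List (String × List String)) :
    revGet v (flattenMap m) = scanOpt v m := by
  induction m with
  | nil => rfl
  | cons p rest ih =>
    obtain ⟨c, as⟩ := p
    rw [flattenMap_cons, revGet_append, revGet_entry]
    by_cases h : v ∈ PySem.Str.lower c :: as.map PySem.Str.lower
    · simp [scanOpt, h]
    · simp [scanOpt, h, ih]

-- keep only the first occurrence of each key (seen = keys already emitted)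
def dedupFirst (seen : List String) : List (String × String) → List (String × String)
  | [] => []
  | (k, c) :: rest =>
    if k ∈ seen then dedupFirst seen rest
    else (k, c) :: dedupFirst (k :: seen) rest

theorem revGet_dedupFirst (v : String) (xs : List (String × String))
    (seen : List String) :
    revGet v (dedupFirst seen xs) = if v ∈ seen then none else revGet v xs := by
  induction xs generalizing seen with
  | nil => simp [dedupFirst, revGet]
  | cons p rest ih =>
    obtain ⟨k, c⟩ := p
    by_cases hk : k ∈ seen
    · rw [dedupFirst, if_pos hk, ih]
      by_cases hv : v ∈ seen
      · simp [hv]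
      · have hne : v ≠ k := fun e => hv (e ▸ hk)
        simp [hv, revGet, hne]
    · rw [dedupFirst, if_neg hk]
      by_cases hvk : v = k
      · subst hvk
        simp [revGet, hk]
      · rw [revGet, if_neg hvk, revGet, if_neg hvk, ih]
        by_cases hv : v ∈ seen
        · rw [if_pos hv, if_pos (List.mem_cons_of_mem _ hv)]
        · rw [if_neg hv, if_neg (by simp [hvk, hv])]

-- the literal table is exactly the first-wins dedup of the flattened map
set_option maxHeartbeats 4000000 in
set_option maxRecDepth 100000 in
theorem revTable_eq : revTable = dedupFirst [] (flattenMap aliasMap) := by decide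

theorem revGet_table (v : String) :
    revGet v revTable = scanOpt v aliasMap := by
  rw [revTable_eq, revGet_dedupFirst, revGet_flatten]
  simp

-- ===== VERDICT (by name: the statement is the Claim_ definition above) =====
theorem normalize_choice_spec : Claim_equal_normalize_choice := by
  intro value _domain _
  unfold Spec_normalize_choice normalize_choice normalize_choice_alt
  simp only []
  split_ifs with h
  · rfl
  · rw [revGet_table, scan_eq_scanOpt]
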